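-- pv_equiv track=rewrite | github.com/waleedabdeen/MiCRA | backend/classifier/evaluation.py | distance_between_labels_arrays
-- ===== SOURCE A (Python) =====
-- def distance_between_labels_arrays(true_labels, predicted_labels, max_distance):
--    result = []
--    for l1 in true_labels:
--       if len(predicted_labels) > 0:
--         min_d = max_distance
--         for l2 in predicted_labels:
--           d = distance_between_labels(l1, l2)
--           if d < min_d:
--             min_d = d
--
--         result.append(min_d)
--
--    return result
--
-- def distance_between_labels(l1, l2):
--    l1_len = len(l1)
--    l2_len = len(l2)
--    min_len = min(l1_len, l2_len)
--
--    offset = 0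
--    for i in range(min_len):
--       if l1[i] != l2[i]:
--          offset = 0
--          break
--       else:
--         offset = 1
--
--    distance = l1_len + l2_len - ((i + offset) * 2)
--
--    return distance
-- ===== SOURCE B (Python) =====
-- def distance_between_labels_arrays(true_labels, predicted_labels, max_distance):
--     if not predicted_labels:
--         return []
--     # build once: every prefix of a predicted label -> minimum length of a
--     # predicted label having that prefix
--     pref_min = {}
--     for l2 in predicted_labels:
--         n = len(l2)
--         for d in range(n + 1):
--             p = l2[:d]
--             if p not in pref_min or n < pref_min[p]:
--                 pref_min[p] = n
--     result = []
--     for l1 in true_labels: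
--         best = max_distance
--         n1 = len(l1)
--         for d in range(n1 + 1):
--             p = l1[:d]
--             if p not in pref_min:
--                 break
--             cand = n1 + pref_min[p] - 2 * d
--             if cand < best:
--                 best = cand
--         result.append(best)
--     return result
-- ===== Notes on version B (the rewrite author's own statement) =====
-- stated objective: faster
-- what changed: B replaces A's inner scan over all predicted labels per true label by a prefix->min-length index built once over the predicted labels; each true label is then answered by walking its own prefixes, so the T*P cross product disappears.
import Mathlib
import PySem

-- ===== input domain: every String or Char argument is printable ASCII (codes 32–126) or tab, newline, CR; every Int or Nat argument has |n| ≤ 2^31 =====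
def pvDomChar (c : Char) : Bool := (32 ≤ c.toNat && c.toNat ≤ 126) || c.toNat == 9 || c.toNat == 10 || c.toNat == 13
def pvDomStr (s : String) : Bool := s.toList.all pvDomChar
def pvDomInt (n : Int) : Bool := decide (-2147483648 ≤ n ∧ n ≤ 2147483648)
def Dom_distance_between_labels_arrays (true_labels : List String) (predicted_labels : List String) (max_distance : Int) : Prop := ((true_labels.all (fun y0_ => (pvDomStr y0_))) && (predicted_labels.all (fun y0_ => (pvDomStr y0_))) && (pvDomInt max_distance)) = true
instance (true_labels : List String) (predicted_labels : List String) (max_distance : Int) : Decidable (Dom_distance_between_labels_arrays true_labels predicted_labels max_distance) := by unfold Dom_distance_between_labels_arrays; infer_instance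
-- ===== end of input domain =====

-- B replaces A's per-true-label scan over all predicted labels by a prefix → minimum-length
-- index built once over the predicted labels (objective: faster; the T×P cross product disappears).

-- ===== PORT A =====
-- 'for i in range(min_len): if l1[i] != l2[i]: offset = 0; break else: offset = 1',
-- transcribed as a recursion over the two char lists carrying the loop variable i;
-- returns the final (i, offset).  When min_len = 0 Python never binds i and the
-- subsequent use of i raises NameError (excluded by Pre_); the port returns (i, 0) there.
def pvLoopA : List Char → List Char → Nat → Nat × Nat
  | x :: as, y :: bs, i =>
    if x ≠ y then (i, 0)
    else
      match as, bs with
      | _ :: _, _ :: _ => pvLoopA as bs (i + 1)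
      | _, _ => (i, 1)
  | _, _, i => (i, 0)

-- distance_between_labels
def pvDistA (l1 l2 : List Char) : Int :=
  let r := pvLoopA l1 l2 0
  (l1.length : Int) + (l2.length : Int) - ((r.1 + r.2 : Nat) : Int) * 2

def distance_between_labels_arrays (true_labels : List String) (predicted_labels : List String) (max_distance : Int) : List Int :=
  true_labels.foldl (fun result l1 =>
    if (predicted_labels.length : Int) > 0 then
      result ++ [predicted_labels.foldl (fun min_d l2 =>
        let d := pvDistA l1.toList l2.toList
        if d < min_d then d else min_d) max_distance]
    else result) []

-- ===== PORT B =====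
-- one body of B's index-building inner loop: 'p = l2[:d]; if p not in pref_min or n < pref_min[p]: pref_min[p] = n'
def pvStep (n : Int) (l2c : List Char) (dct : PySem.Dict String Int) (d : Int) : PySem.Dict String Int :=
  let p := String.ofList (l2c.take d.toNat)
  match dct.get? p with
  | none => dct.insert p n
  | some m => if n < m then dct.insert p n else dct

-- pref_min: every prefix of a predicted label ↦ minimum length of a predicted label with that prefix
def pvPrefMin (predicted_labels : List String) : PySem.Dict String Int :=
  predicted_labels.foldl (fun dct l2 =>
    let n : Int := (l2.toList.length : Int)
    (PySem.List.pyRange 0 (n + 1) 1).foldl (pvStep n l2.toList) dct) PySem.Dict.empty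

-- B's query loop 'for d in range(n1+1): … break' (fuel = number of remaining iterations)
def pvScan (pm : PySem.Dict String Int) (l1c : List Char) (n1 : Int) (best : Int) (d : Nat) : Nat → Int
  | 0 => best
  | fuel + 1 =>
    match pm.get? (String.ofList (l1c.take d)) with
    | none => best
    | some m =>
      let cand := n1 + m - 2 * (d : Int)
      pvScan pm l1c n1 (if cand < best then cand else best) (d + 1) fuel

def distance_between_labels_arrays_alt (true_labels : List String) (predicted_labels : List String) (max_distance : Int) : List Int :=
  if predicted_labels = [] then []
  else
    let pm := pvPrefMin predicted_labels
    true_labels.foldl (fun result l1 =>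
      let l1c := l1.toList
      result ++ [pvScan pm l1c (l1c.length : Int) max_distance 0 (l1c.length + 1)]) []

-- ===== PRECONDITION & SPEC =====
-- Pre_ excludes exactly the inputs on which Python A raises NameError: whenever both lists are
-- nonempty and some label is the empty string, distance_between_labels runs 'range(0)' and then
-- reads the never-bound loop variable i.
def Pre_distance_between_labels_arrays (true_labels : List String) (predicted_labels : List String) (max_distance : Int) : Prop :=
  predicted_labels = [] ∨ true_labels = [] ∨
    ((∀ s ∈ true_labels, s ≠ "") ∧ (∀ s ∈ predicted_labels, s ≠ ""))
instance (true_labels : List String) (predicted_labels : List String) (max_distance : Int) : Decidable (Pre_distance_between_labels_arrays true_labels predicted_labels max_distance) := by unfold Pre_distance_between_labels_arrays; infer_instance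

def pvWitness_distance_between_labels_arrays : List String × List String × Int := (["ab", "cd"], ["ac", "ab1"], 9)

def Spec_distance_between_labels_arrays (true_labels : List String) (predicted_labels : List String) (max_distance : Int) (out : List Int) : Prop := out = distance_between_labels_arrays_alt true_labels predicted_labels max_distance
instance (true_labels : List String) (predicted_labels : List String) (max_distance : Int) (out : List Int) : Decidable (Spec_distance_between_labels_arrays true_labels predicted_labels max_distance out) := by unfold Spec_distance_between_labels_arrays; infer_instance

-- ===== CLAIM (what is proved, stated in full; the proofs are below) =====
def Claim_equal_distance_between_labels_arrays : Prop := ∀ (true_labels : List String) (predicted_labels : List String) (max_distance : Int), Dom_distance_between_labels_arrays true_labels predicted_labels max_distance → Pre_distance_between_labels_arrays true_labels predicted_labels max_distance → Spec_distance_between_labels_arrays true_labels predicted_labels max_distance (distance_between_labels_arrays true_labels predicted_labels max_distance)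


-- ===== LEMMAS AND PROOFS =====

-- common prefix length of two char lists
def pvCpl : List Char → List Char → Nat
  | x :: as, y :: bs => if x = y then pvCpl as bs + 1 else 0
  | _, _ => 0

theorem pvCpl_le_left (a b : List Char) : pvCpl a b ≤ a.length := by
  induction a generalizing b with
  | nil => cases b <;> simp [pvCpl]
  | cons x as ih =>
    cases b with
    | nil => simp [pvCpl]
    | cons y bs =>
      by_cases h : x = y
      · simp only [pvCpl, if_pos h, List.length_cons]
        exact Nat.add_le_add_right (ih bs) 1
      · simp [pvCpl, h]

theorem pvLoopA_sum (a b : List Char) (i : Nat) :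
    (pvLoopA a b i).1 + (pvLoopA a b i).2 = i + pvCpl a b := by
  induction a generalizing b i with
  | nil => cases b <;> simp [pvLoopA, pvCpl]
  | cons x as ih =>
    cases b with
    | nil => simp [pvLoopA, pvCpl]
    | cons y bs =>
      by_cases h : x = y
      · subst h
        cases as with
        | nil => simp [pvLoopA, pvCpl]
        | cons a2 as2 =>
          cases bs with
          | nil => simp [pvLoopA, pvCpl]
          | cons b2 bs2 =>
            have hstep : pvLoopA (x :: a2 :: as2) (x :: b2 :: bs2) i
                = pvLoopA (a2 :: as2) (b2 :: bs2) (i + 1) := by simp [pvLoopA]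
            have hcpl : pvCpl (x :: a2 :: as2) (x :: b2 :: bs2)
                = pvCpl (a2 :: as2) (b2 :: bs2) + 1 := by simp [pvCpl]
            rw [hstep, hcpl]
            have := ih (b2 :: bs2) (i + 1)
            omega
      · simp [pvLoopA, pvCpl, h]

theorem pvDistA_eq (a b : List Char) :
    pvDistA a b = (a.length : Int) + (b.length : Int) - 2 * (pvCpl a b : Nat) := by
  unfold pvDistA
  have := pvLoopA_sum a b 0
  push_cast [this]
  ring

-- strict-min accumulation = fold of min
theorem foldl_if_lt_eq_min {α : Type} (xs : List α) (f : α → Int) (m : Int) :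
    xs.foldl (fun m l2 => let d := f l2; if d < m then d else m) m
      = (xs.map f).foldl min m := by
  induction xs generalizing m with
  | nil => simp
  | cons x xs ih =>
    simp only [List.foldl_cons, List.map_cons]
    rw [ih]
    congr 1
    simp only [min_def]
    split_ifs <;> omega

theorem foldl_min_le_init (m : Int) (xs : List Int) : xs.foldl min m ≤ m := by
  induction xs generalizing m with
  | nil => simp
  | cons x xs ih =>
    simp only [List.foldl_cons]
    exact le_trans (ih (min m x)) (min_le_left _ _)

theorem foldl_min_le_mem (m : Int) (xs : List Int) {x : Int} (hx : x ∈ xs) :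
    xs.foldl min m ≤ x := by
  induction xs generalizing m with
  | nil => simp at hx
  | cons z xs ih =>
    simp only [List.foldl_cons]
    rcases List.mem_cons.mp hx with h | h
    · subst h
      exact le_trans (foldl_min_le_init _ _) (min_le_right _ _)
    · exact ih (min m z) h

theorem foldl_min_eq_init_or_mem (m : Int) (xs : List Int) :
    xs.foldl min m = m ∨ xs.foldl min m ∈ xs := by
  induction xs generalizing m with
  | nil => simp
  | cons x xs ih =>
    simp only [List.foldl_cons]
    rcases ih (min m x) with h | h
    · rcases le_total m x with hle | hle
      · left; rw [h]; exact min_eq_left hle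
      · right; rw [h, min_eq_right hle]; exact List.mem_cons_self
    · right; exact List.mem_cons_of_mem x h

theorem foldl_min_eq_of_dominates (m : Int) (xs ys : List Int)
    (h1 : ∀ y ∈ ys, ∃ x ∈ xs, x ≤ y) (h2 : ∀ x ∈ xs, ∃ y ∈ ys, y ≤ x) :
    xs.foldl min m = ys.foldl min m := by
  apply le_antisymm
  · rcases foldl_min_eq_init_or_mem m ys with h | h
    · rw [h]; exact foldl_min_le_init m xs
    · obtain ⟨x, hx, hxy⟩ := h1 _ h
      exact le_trans (foldl_min_le_mem m xs hx) hxy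
  · rcases foldl_min_eq_init_or_mem m xs with h | h
    · rw [h]; exact foldl_min_le_init m ys
    · obtain ⟨y, hy, hyx⟩ := h2 _ h
      exact le_trans (foldl_min_le_mem m ys hy) hyx

-- prefixes of a of length d ≤ |a| ↔ lower bounds on the common prefix length
theorem take_prefix_iff_cpl (d : Nat) : ∀ (a ys : List Char), d ≤ a.length →
    (a.take d <+: ys ↔ d ≤ pvCpl a ys) := by
  induction d with
  | zero => intro a ys _; simp
  | succ d ih =>
    intro a ys hd
    cases a with
    | nil => simp at hd
    | cons x as =>
      cases ys with
      | nil => simp [pvCpl]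
      | cons y ys =>
        simp only [List.take_succ_cons, List.cons_prefix_cons, pvCpl]
        by_cases h : x = y
        · subst h
          have hih := ih as ys (by simpa using hd)
          simp [hih]
        · simp [h]

-- min combination on options (the dict update of B)
def pvOptMin : Option Int → Int → Option Int
  | none, n => some n
  | some m, n => some (if n < m then n else m)

theorem pvOptMin_idem (o : Option Int) (n : Int) : pvOptMin (pvOptMin o n) n = pvOptMin o n := by
  cases o with
  | none => simp [pvOptMin]
  | some m => simp only [pvOptMin, Option.some.injEq]; split_ifs <;> omega

-- mathematical value of pref_min at one key
def pvPM (p : List String) (key : String) : Option Int :=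
  p.foldl (fun o l2 => if key.toList.isPrefixOf l2.toList then pvOptMin o (l2.toList.length : Int) else o) none

theorem pvStep_get (n : Int) (l2c : List Char) (d : Int) (dct : PySem.Dict String Int) (key : String) :
    (pvStep n l2c dct d).get? key =
      if String.ofList (l2c.take d.toNat) = key then pvOptMin (dct.get? key) n
      else dct.get? key := by
  unfold pvStep
  by_cases h : String.ofList (l2c.take d.toNat) = key
  · rw [if_pos h, ← h]
    cases hg : dct.get? (String.ofList (l2c.take d.toNat)) with
    | none => simp [hg, pvOptMin]
    | some m =>
      simp only [hg, pvOptMin]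
      split_ifs with hnm
      · simp
      · simp [hg]
  · rw [if_neg h]
    have hne : key ≠ String.ofList (l2c.take d.toNat) := fun he => h he.symm
    cases hg : dct.get? (String.ofList (l2c.take d.toNat)) with
    | none => simp [hg, PySem.Dict.get?_insert, hne]
    | some m =>
      simp only [hg]
      split_ifs with hnm
      · simp [PySem.Dict.get?_insert, hne]
      · rfl

theorem innerFold_get (n : Int) (l2c : List Char) (key : String) (ds : List Int) (dct : PySem.Dict String Int) :
    (ds.foldl (pvStep n l2c) dct).get? key =
      if ∃ d ∈ ds, String.ofList (l2c.take d.toNat) = key then pvOptMin (dct.get? key) n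
      else dct.get? key := by
  induction ds generalizing dct with
  | nil => simp
  | cons d ds ih =>
    simp only [List.foldl_cons]
    rw [ih, pvStep_get]
    by_cases hhit : String.ofList (l2c.take d.toNat) = key
    · by_cases hex : ∃ d' ∈ ds, String.ofList (l2c.take d'.toNat) = key
      · simp only [if_pos hhit, if_pos hex, pvOptMin_idem]
        rw [if_pos ⟨d, List.mem_cons_self, hhit⟩]
      · simp only [if_pos hhit, if_neg hex]
        rw [if_pos ⟨d, List.mem_cons_self, hhit⟩]
    · by_cases hex : ∃ d' ∈ ds, String.ofList (l2c.take d'.toNat) = key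
      · simp only [if_neg hhit, if_pos hex]
        obtain ⟨d', hd', he⟩ := hex
        rw [if_pos ⟨d', List.mem_cons_of_mem d hd', he⟩]
      · simp only [if_neg hhit, if_neg hex]
        rw [if_neg]
        rintro ⟨d', hd', he⟩
        rcases List.mem_cons.mp hd' with rfl | hmem
        · exact hhit he
        · exact hex ⟨d', hmem, he⟩

theorem exists_range_take_iff (l2c : List Char) (key : String) :
    (∃ d ∈ PySem.List.pyRange 0 ((l2c.length : Int) + 1) 1, String.ofList (l2c.take d.toNat) = key)
      ↔ key.toList <+: l2c := by
  constructor
  · rintro ⟨d, hdmem, hk⟩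
    rw [← hk]
    simpa using List.take_prefix d.toNat l2c
  · intro hp
    refine ⟨(key.toList.length : Int), ?_, ?_⟩
    · have := hp.length_le
      simp only [PySem.List.mem_pyRange_one]
      constructor
      · positivity
      · omega
    · rw [Int.toNat_natCast]
      rw [← List.prefix_iff_eq_take.mp hp]
      simp

theorem prefMin_fold_get (p : List String) (key : String) :
    ∀ (dct : PySem.Dict String Int),
    (p.foldl (fun dct l2 =>
        let n : Int := (l2.toList.length : Int)
        (PySem.List.pyRange 0 (n + 1) 1).foldl (pvStep n l2.toList) dct) dct).get? key
      = p.foldl (fun o l2 => if key.toList.isPrefixOf l2.toList then pvOptMin o (l2.toList.length : Int) else o) (dct.get? key) := by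
  induction p with
  | nil => intro dct; simp
  | cons l2 rest ih =>
    intro dct
    simp only [List.foldl_cons]
    rw [ih, innerFold_get]
    congr 1
    by_cases hex : ∃ d ∈ PySem.List.pyRange 0 ((l2.toList.length : Int) + 1) 1,
        String.ofList (l2.toList.take d.toNat) = key
    · rw [if_pos hex,
        if_pos (List.isPrefixOf_iff_prefix.mpr ((exists_range_take_iff l2.toList key).mp hex))]
    · rw [if_neg hex, if_neg (fun hp =>
        hex ((exists_range_take_iff l2.toList key).mpr (List.isPrefixOf_iff_prefix.mp hp)))]

theorem pvPrefMin_get (p : List String) (key : String) :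
    (pvPrefMin p).get? key = pvPM p key := by
  unfold pvPrefMin pvPM
  rw [prefMin_fold_get]
  simp

theorem foldl_filter_optMin {α : Type} (c : α → Bool) (f : α → Int) (p : List α) :
    ∀ (o0 : Option Int),
    p.foldl (fun o l2 => if c l2 then pvOptMin o (f l2) else o) o0
      = ((p.filter c).map f).foldl pvOptMin o0 := by
  induction p with
  | nil => intro o0; simp
  | cons x rest ih =>
    intro o0
    by_cases h : c x <;> simp [h, ih]

theorem pvPM_eq_optFold (p : List String) (key : String) :
    pvPM p key = ((p.filter (fun l2 => key.toList.isPrefixOf l2.toList)).map (fun l2 => (l2.toList.length : Int))).foldl pvOptMin none := by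
  unfold pvPM
  rw [foldl_filter_optMin]

theorem optFold_some (xs : List Int) (c : Int) :
    ∃ m, xs.foldl pvOptMin (some c) = some m ∧ m ≤ c ∧ (m = c ∨ m ∈ xs) ∧ ∀ x ∈ xs, m ≤ x := by
  induction xs generalizing c with
  | nil => exact ⟨c, rfl, le_refl c, Or.inl rfl, by simp⟩
  | cons x xs ih =>
    obtain ⟨m, hm, hle, hmem, hall⟩ := ih (if x < c then x else c)
    refine ⟨m, by simpa [pvOptMin] using hm, by split_ifs at hle <;> omega, ?_, ?_⟩
    · rcases hmem with h | h
      · by_cases hx : x < c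
        · right; rw [if_pos hx] at h; rw [h]; exact List.mem_cons_self
        · left; rw [if_neg hx] at h; exact h
      · right; exact List.mem_cons_of_mem x h
    · intro z hz
      rcases List.mem_cons.mp hz with rfl | hzz
      · split_ifs at hle <;> omega
      · exact hall z hzz

theorem pvPM_none_iff (p : List String) (key : String) :
    pvPM p key = none ↔ ∀ l2 ∈ p, ¬ (key.toList <+: l2.toList) := by
  rw [pvPM_eq_optFold]
  constructor
  · intro h
    cases hl : (p.filter (fun l2 => key.toList.isPrefixOf l2.toList)).map (fun l2 => (l2.toList.length : Int)) with
    | nil =>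
      intro l2 hl2 hpre
      have : l2 ∈ p.filter (fun l2 => key.toList.isPrefixOf l2.toList) :=
        List.mem_filter.mpr ⟨hl2, List.isPrefixOf_iff_prefix.mpr hpre⟩
      have := List.mem_map_of_mem (f := fun l2 => ((l2.toList.length : Int))) this
      rw [hl] at this
      simp at this
    | cons x xs =>
      rw [hl] at h
      simp only [List.foldl_cons, pvOptMin] at h
      obtain ⟨m, hm, -⟩ := optFold_some xs x
      rw [hm] at h
      simp at h
  · intro h
    have : p.filter (fun l2 => key.toList.isPrefixOf l2.toList) = [] := by
      rw [List.filter_eq_nil_iff]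
      intro l2 hl2
      simpa [List.isPrefixOf_iff_prefix] using h l2 hl2
    rw [this]
    simp

theorem pvPM_some (p : List String) (key : String) (m : Int) (h : pvPM p key = some m) :
    (∃ l2 ∈ p, key.toList <+: l2.toList ∧ (l2.toList.length : Int) = m) ∧
      (∀ l2 ∈ p, key.toList <+: l2.toList → m ≤ (l2.toList.length : Int)) := by
  rw [pvPM_eq_optFold] at h
  cases hl : (p.filter (fun l2 => key.toList.isPrefixOf l2.toList)).map (fun l2 => (l2.toList.length : Int)) with
  | nil => rw [hl] at h; simp at h
  | cons x xs =>
    rw [hl] at h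
    simp only [List.foldl_cons, pvOptMin] at h
    obtain ⟨m', hm', hle', hmem', hall'⟩ := optFold_some xs x
    rw [hm'] at h
    have hmm : m = m' := by simpa using h.symm
    subst hmm
    have hmemL : m ∈ (p.filter (fun l2 => key.toList.isPrefixOf l2.toList)).map (fun l2 => (l2.toList.length : Int)) := by
      rw [hl]
      rcases hmem' with rfl | hmx
      · exact List.mem_cons_self
      · exact List.mem_cons_of_mem x hmx
    have hallL : ∀ z ∈ (p.filter (fun l2 => key.toList.isPrefixOf l2.toList)).map (fun l2 => (l2.toList.length : Int)), m ≤ z := by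
      rw [hl]
      intro z hz
      rcases List.mem_cons.mp hz with rfl | hzz
      · exact hle'
      · exact hall' z hzz
    constructor
    · obtain ⟨l2, hl2mem, hl2len⟩ := List.mem_map.mp hmemL
      obtain ⟨hl2p, hl2pre⟩ := List.mem_filter.mp hl2mem
      exact ⟨l2, hl2p, List.isPrefixOf_iff_prefix.mp hl2pre, hl2len⟩
    · intro l2 hl2 hpre
      exact hallL _ (List.mem_map_of_mem (List.mem_filter.mpr ⟨hl2, List.isPrefixOf_iff_prefix.mpr hpre⟩))

-- the distances contributed by predicted labels whose common prefix with a is at least d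
def pvDistsGe (p : List String) (a : List Char) (d : Nat) : List Int :=
  (p.filter (fun l2 => d ≤ pvCpl a l2.toList)).map
    (fun l2 => (a.length : Int) + (l2.toList.length : Int) - 2 * (pvCpl a l2.toList : Nat))

theorem pvScan_eq (p : List String) (a : List Char) (fuel d : Nat) (best : Int)
    (hf : d + fuel = a.length + 1) :
    pvScan (pvPrefMin p) a (a.length : Int) best d fuel = (pvDistsGe p a d).foldl min best := by
  induction fuel generalizing d best with
  | zero =>
    have hEmpty : pvDistsGe p a d = [] := by
      unfold pvDistsGe
      rw [List.filter_eq_nil_iff.mpr ?_]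
      · simp
      · intro l2 _
        have := pvCpl_le_left a l2.toList
        simp only [decide_eq_true_eq]
        omega
    rw [hEmpty]
    simp [pvScan]
  | succ fuel ih =>
    have hd : d ≤ a.length := by omega
    have hkey : (String.ofList (a.take d)).toList = a.take d := by simp
    simp only [pvScan]
    rw [pvPrefMin_get]
    cases hpm : pvPM p (String.ofList (a.take d)) with
    | none =>
      have hnone := (pvPM_none_iff _ _).mp hpm
      have hEmpty : pvDistsGe p a d = [] := by
        unfold pvDistsGe
        rw [List.filter_eq_nil_iff.mpr ?_]
        · simp
        · intro l2 hl2
          simp only [decide_eq_true_eq]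
          intro hdc
          exact hnone l2 hl2 (by rw [hkey]; exact (take_prefix_iff_cpl d a l2.toList hd).mpr hdc)
      rw [hEmpty]
      simp
    | some m =>
      obtain ⟨⟨l2s, hl2sp, hl2spre, hl2slen⟩, hub⟩ := pvPM_some p _ m hpm
      rw [hkey] at hl2spre
      have hcpls : d ≤ pvCpl a l2s.toList := (take_prefix_iff_cpl d a l2s.toList hd).mp hl2spre
      simp only []
      rw [ih (d + 1) _ (by omega)]
      have hmin : (if (a.length : Int) + m - 2 * (d : Int) < best
            then (a.length : Int) + m - 2 * (d : Int) else best)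
          = min best ((a.length : Int) + m - 2 * (d : Int)) := by
        rw [min_def]; split_ifs <;> omega
      rw [hmin, ← List.foldl_cons]
      apply foldl_min_eq_of_dominates
      · intro y hy
        simp only [pvDistsGe, List.mem_map, List.mem_filter, decide_eq_true_eq] at hy
        obtain ⟨l2, ⟨hl2p, hge⟩, rfl⟩ := hy
        by_cases hgt : d + 1 ≤ pvCpl a l2.toList
        · refine ⟨_, List.mem_cons_of_mem _ ?_, le_refl _⟩
          simp only [pvDistsGe, List.mem_map, List.mem_filter, decide_eq_true_eq]
          exact ⟨l2, ⟨hl2p, hgt⟩, rfl⟩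
        · have hc : pvCpl a l2.toList = d := by omega
          refine ⟨_, List.mem_cons_self, ?_⟩
          have hm2 : m ≤ (l2.toList.length : Int) := hub l2 hl2p
            (by rw [hkey]; exact (take_prefix_iff_cpl d a l2.toList hd).mpr (by omega))
          rw [hc]
          omega
      · intro x hx
        rcases List.mem_cons.mp hx with rfl | hx'
        · refine ⟨(a.length : Int) + (l2s.toList.length : Int) - 2 * (pvCpl a l2s.toList : Nat), ?_, ?_⟩
          · simp only [pvDistsGe, List.mem_map, List.mem_filter, decide_eq_true_eq]
            exact ⟨l2s, ⟨hl2sp, hcpls⟩, rfl⟩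
          · have hdc : (d : Int) ≤ (pvCpl a l2s.toList : Nat) := by exact_mod_cast hcpls
            omega
        · obtain ⟨l2, ⟨hl2p, hge⟩, rfl⟩ := by
            simpa only [pvDistsGe, List.mem_map, List.mem_filter, decide_eq_true_eq] using hx'
          refine ⟨_, ?_, le_refl _⟩
          simp only [pvDistsGe, List.mem_map, List.mem_filter, decide_eq_true_eq]
          exact ⟨l2, ⟨hl2p, by omega⟩, rfl⟩

theorem foldl_append_map {α β : Type} (t : List α) (g : α → β) (acc : List β) :
    t.foldl (fun r x => r ++ [g x]) acc = acc ++ t.map g := by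
  induction t generalizing acc with
  | nil => simp
  | cons x xs ih => simp [ih]

-- ===== VERDICT (by name: the statement is the Claim_ definition above) =====
theorem distance_between_labels_arrays_spec : Claim_equal_distance_between_labels_arrays := by
  intro t p md _ _
  unfold Spec_distance_between_labels_arrays
  unfold distance_between_labels_arrays distance_between_labels_arrays_alt
  by_cases hp : p = []
  · subst hp
    have : ∀ (l : List String) (acc : List Int),
        l.foldl (fun (r : List Int) (_ : String) => r) acc = acc := by
      intro l
      induction l with
      | nil => intro acc; rfl
      | cons x xs ih => intro acc; exact ih acc
    simp only [List.length_nil, Int.natCast_zero, gt_iff_lt, lt_irrefl, if_false]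
    exact (this t []).symm ▸ rfl
  · have hlen : ((p.length : Int) > 0) := by
      cases p with
      | nil => exact absurd rfl hp
      | cons x xs => simp
    simp only [if_pos hlen, if_neg hp]
    rw [foldl_append_map, foldl_append_map, List.nil_append, List.nil_append]
    apply List.map_congr_left
    intro l1 _
    rw [foldl_if_lt_eq_min p (fun l2 => pvDistA l1.toList l2.toList) md]
    rw [pvScan_eq p l1.toList (l1.toList.length + 1) 0 md (by omega)]
    have hall : pvDistsGe p l1.toList 0 = p.map (fun l2 =>
        (l1.toList.length : Int) + (l2.toList.length : Int) - 2 * (pvCpl l1.toList l2.toList : Nat)) := by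
      unfold pvDistsGe
      congr 1
      apply List.filter_eq_self.mpr
      intro l2 _
      simp
    rw [hall]
    congr 1
    apply List.map_congr_left
    intro l2 _
    exact pvDistA_eq l1.toList l2.toList
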